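-- pv_equiv track=rewrite | github.com/skeetyu/Domain-Specific-Code-Completion | code/utils.py | split_java_code
-- ===== SOURCE A (Python) =====
-- def split_java_code(code):
--     tokens = code.split()
--     statements = []
--     cur_tokens = []
--     for token in tokens:
--         cur_tokens.append(token)
--         if token in [';', '{', '}']:
--             statements.append(" ".join(cur_tokens))
--             cur_tokens = []
--
--     if len(cur_tokens) > 0:
--         statements.append(" ".join(cur_tokens))
--
--     return statements
-- ===== SOURCE B (Python) =====
-- DELIMS = (';', '{', '}')
--
--
-- def _first_delim(tokens):
--     return next((i for i, t in enumerate(tokens) if t in DELIMS), None)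
--
--
-- def split_java_code(code):
--     rest = code.split()
--     statements = []
--     while True:
--         i = _first_delim(rest)
--         if i is None:
--             break
--         statements.append(" ".join(rest[:i + 1]))
--         rest = rest[i + 1:]
--     if rest:
--         statements.append(" ".join(rest))
--     return statements
-- ===== Notes on version B (the rewrite author's own statement) =====
-- stated objective: alternative
-- what changed: Replaces the stateful flush accumulator (append each token, flush on delimiter) with segment-at-a-time recursion: repeatedly find the first delimiter token, emit the joined slice up to and including it, and continue on the remainder, emitting the leftover tail only if non-empty.
import Mathlib
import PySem

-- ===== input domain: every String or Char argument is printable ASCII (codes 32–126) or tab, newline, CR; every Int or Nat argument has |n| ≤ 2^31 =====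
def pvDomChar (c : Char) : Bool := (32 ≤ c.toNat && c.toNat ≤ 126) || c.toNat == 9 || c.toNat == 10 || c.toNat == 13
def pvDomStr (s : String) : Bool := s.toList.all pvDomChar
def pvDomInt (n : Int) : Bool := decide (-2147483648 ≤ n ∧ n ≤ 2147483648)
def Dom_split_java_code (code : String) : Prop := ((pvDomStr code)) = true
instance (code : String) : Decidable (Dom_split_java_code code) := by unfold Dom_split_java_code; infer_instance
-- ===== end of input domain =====

-- B replaces A's flush accumulator with find-first-delimiter recursion over slices; objective: alternative decomposition (same cost).

-- ===== PORT A =====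
-- `token in [';','{','}']`
def pvIsDelim (token : String) : Bool := token = ";" || token = "{" || token = "}"

def split_java_code (code : String) : List String :=
  let tokens := PySem.Str.split₀ code
  let st := tokens.foldl
    (fun (p : List String × List String) token =>
      let cur_tokens := p.2 ++ [token]
      if pvIsDelim token then (p.1 ++ [PySem.Str.join " " cur_tokens], [])
      else (p.1, cur_tokens))
    ([], [])
  if st.2.length > 0 then st.1 ++ [PySem.Str.join " " st.2] else st.1

-- ===== PORT B =====
-- next((i for i, t in enumerate(tokens) if t in DELIMS), None) = index of first delimiter token
def pvFirstDelim (tokens : List String) : Option Nat := tokens.findIdx? pvIsDelim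

-- the while-loop of Source B as recursion on `rest`; rest[:i+1] / rest[i+1:] are
-- List.take / List.drop (exact for these nonnegative in-range slice bounds);
-- the loop removes ≥ 1 token per iteration, so fuel = rest.length + 1 never runs out
def pvSegmentsF : Nat → List String → List String
  | 0, _ => []
  | fuel + 1, rest =>
    match pvFirstDelim rest with
    | some i =>
        PySem.Str.join " " (rest.take (i + 1)) :: pvSegmentsF fuel (rest.drop (i + 1))
    | none => if rest.isEmpty then [] else [PySem.Str.join " " rest]

def split_java_code_alt (code : String) : List String :=
  let tokens := PySem.Str.split₀ code
  pvSegmentsF (tokens.length + 1) tokens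

-- ===== PRECONDITION & SPEC =====
def Spec_split_java_code (code : String) (out : List String) : Prop := out = split_java_code_alt code
instance (code : String) (out : List String) : Decidable (Spec_split_java_code code out) := by unfold Spec_split_java_code; infer_instance

-- ===== CLAIM (what is proved, stated in full; the proofs are below) =====
def Claim_equal_split_java_code : Prop := ∀ (code : String), Dom_split_java_code code → Spec_split_java_code code (split_java_code code)

-- ===== LEMMAS AND PROOFS =====

-- A's loop body
def pvStep (p : List String × List String) (token : String) : List String × List String :=
  let cur_tokens := p.2 ++ [token]
  if pvIsDelim token then (p.1 ++ [PySem.Str.join " " cur_tokens], [])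
  else (p.1, cur_tokens)

-- A's finalizer
def pvFin (st : List String × List String) : List String :=
  if st.2.length > 0 then st.1 ++ [PySem.Str.join " " st.2] else st.1

-- structural-recursive characterisation of A's computation
def pvAux (cur : List String) : List String → List String
  | [] => if cur.isEmpty then [] else [PySem.Str.join " " cur]
  | t :: ts =>
      if pvIsDelim t then PySem.Str.join " " (cur ++ [t]) :: pvAux [] ts
      else pvAux (cur ++ [t]) ts

theorem pvFoldl_eq_aux (tokens : List String) :
    ∀ stmts cur, pvFin (tokens.foldl pvStep (stmts, cur)) = stmts ++ pvAux cur tokens := by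
  induction tokens with
  | nil =>
      intro stmts cur
      simp only [List.foldl_nil, pvFin, pvAux]
      cases cur with
      | nil => simp
      | cons c cs => simp
  | cons t ts ih =>
      intro stmts cur
      simp only [List.foldl_cons, pvStep, pvAux]
      by_cases h : pvIsDelim t
      · simp [h, ih]
      · simp [h, ih]

-- pvAux unfolded up to the first delimiter, with a leading accumulated prefix `cur`
theorem pvAux_eq_segments (tokens : List String) :
    ∀ cur, pvAux cur tokens =
      match pvFirstDelim tokens with
      | some i => PySem.Str.join " " (cur ++ tokens.take (i + 1)) :: pvAux [] (tokens.drop (i + 1))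
      | none => if cur.isEmpty && tokens.isEmpty then [] else [PySem.Str.join " " (cur ++ tokens)] := by
  induction tokens with
  | nil =>
      intro cur
      simp [pvAux, pvFirstDelim]
  | cons t ts ih =>
      intro cur
      by_cases h : pvIsDelim t
      · have hf : pvFirstDelim (t :: ts) = some 0 := by
          simp [pvFirstDelim, List.findIdx?_cons, h]
        rw [hf]
        simp [pvAux, h, List.take_succ_cons, List.drop_succ_cons]
      · have hf : pvFirstDelim (t :: ts) = (pvFirstDelim ts).map (· + 1) := by
          simp [pvFirstDelim, List.findIdx?_cons, h]
        rw [hf]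
        cases hft : pvFirstDelim ts with
        | some i =>
            simp [pvAux, h, ih (cur ++ [t]), hft, List.take_succ_cons, List.drop_succ_cons,
              List.append_assoc]
        | none =>
            simp [pvAux, h, ih (cur ++ [t]), hft, List.append_assoc]

theorem pvSegmentsF_eq_aux (fuel : Nat) :
    ∀ rest : List String, rest.length < fuel → pvSegmentsF fuel rest = pvAux [] rest := by
  induction fuel with
  | zero => intro rest h; omega
  | succ f ih =>
      intro rest h
      rw [pvAux_eq_segments rest []]
      show (match pvFirstDelim rest with
            | some i => PySem.Str.join " " (rest.take (i + 1)) :: pvSegmentsF f (rest.drop (i + 1))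
            | none => if rest.isEmpty then [] else [PySem.Str.join " " rest]) = _
      cases hf : pvFirstDelim rest with
      | some i =>
          have hlt : i < rest.length := (List.findIdx?_eq_some_iff_findIdx_eq.mp hf).1
          have : (rest.drop (i + 1)).length < f := by
            simp [List.length_drop]; omega
          simp [ih _ this]
      | none => cases rest <;> simp

-- ===== VERDICT (by name: the statement is the Claim_ definition above) =====
theorem split_java_code_spec : Claim_equal_split_java_code := by
  intro code _
  show split_java_code code = split_java_code_alt code
  show pvFin (List.foldl pvStep ([], []) (PySem.Str.split₀ code)) =
    pvSegmentsF ((PySem.Str.split₀ code).length + 1) (PySem.Str.split₀ code)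
  rw [pvFoldl_eq_aux (PySem.Str.split₀ code) [] [], List.nil_append,
    pvSegmentsF_eq_aux _ _ (Nat.lt_succ_self _)]
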